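-- pv_equiv track=rewrite | github.com/DreenL/Past-Project | Lab1.py | skip_every_third_item
-- ===== SOURCE A (Python) =====
-- def skip_every_third_item(n:'list of strings')->'each element in the list':
--     result=''
--     skip = False
--     for i in range(len(n)):
--         if i%3 == 2:
--             skip = True
--         if skip:
--             skip = False
--             continue
--         result+= n[i]+'\n'
--     return result
-- ===== SOURCE B (Python) =====
-- def skip_every_third_item(n: 'list of strings') -> 'each element in the list':
--     # chunked traversal: take the first two elements of every group of three
--     out = []
--     for j in range(0, len(n), 3):
--         out.extend(s + '\n' for s in n[j:j+2])
--     return ''.join(out)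
-- ===== Notes on version B (the rewrite author's own statement) =====
-- stated objective: alternative
-- what changed: Replaces the per-element scan with a skip flag by an outer loop over chunk starts (step 3) that takes the first two elements of each chunk via a slice and joins the pieces once at the end.
import Mathlib
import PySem

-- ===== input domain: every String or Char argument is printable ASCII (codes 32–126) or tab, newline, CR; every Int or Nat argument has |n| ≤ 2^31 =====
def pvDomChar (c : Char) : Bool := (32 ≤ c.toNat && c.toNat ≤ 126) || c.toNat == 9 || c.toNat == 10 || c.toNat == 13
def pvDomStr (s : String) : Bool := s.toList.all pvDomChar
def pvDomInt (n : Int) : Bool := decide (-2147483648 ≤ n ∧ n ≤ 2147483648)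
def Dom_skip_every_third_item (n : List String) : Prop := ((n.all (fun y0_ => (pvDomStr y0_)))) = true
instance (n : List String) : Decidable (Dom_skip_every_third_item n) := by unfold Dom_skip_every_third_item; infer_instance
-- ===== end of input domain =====

-- B replaces A's per-element scan with a skip flag by an outer loop over chunk starts of 3
-- taking the first two of each chunk via a slice, joined once at the end (alternative decomposition).


-- ===== PORT A =====
-- literal port: one pass over range(len(n)), state (result, skip)
def skip_every_third_item (n : List String) : String :=
  ((PySem.List.pyRange 0 (n.length : Int) 1).foldl
    (fun (st : String × Bool) i =>
      let skip := if PySem.Int.mod i 3 = 2 then true else st.2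
      if skip then (st.1, false)
      else (st.1 ++ PySem.List.pyGetD n i "" ++ "\n", skip))
    ("", false)).1

-- ===== PORT B =====
-- literal port of Source B: outer loop over chunk starts, extend with the sliced first two, join once
def skip_every_third_item_alt (n : List String) : String :=
  PySem.Str.join ""
    ((PySem.List.pyRange 0 (n.length : Int) 3).foldl
      (fun out j => out ++ (PySem.List.slice n (some j) (some (j + 2))).map (fun s => s ++ "\n"))
      [])

-- ===== PRECONDITION & SPEC =====
def Spec_skip_every_third_item (n : List String) (out : String) : Prop := out = skip_every_third_item_alt n
instance (n : List String) (out : String) : Decidable (Spec_skip_every_third_item n out) := by unfold Spec_skip_every_third_item; infer_instance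

-- ===== CLAIM (what is proved, stated in full; the proofs are below) =====
def Claim_equal_skip_every_third_item : Prop := ∀ (n : List String), Dom_skip_every_third_item n → Spec_skip_every_third_item n (skip_every_third_item n)

-- ===== LEMMAS AND PROOFS =====

-- the elements both programs keep: the first two of each chunk of three
def pvKeep : List String → List String
  | [] => []
  | [a] => [a]
  | [a, b] => [a, b]
  | a :: b :: _ :: r => a :: b :: pvKeep r

-- the common value, as a character list
def pvSpecChars (n : List String) : List Char :=
  ((pvKeep n).map (fun s => s.toList ++ ['\n'])).flatten

-- ''.join on char lists is flatten
lemma pv_join_empty (l : List (List Char)) : PySem.Chars.join [] l = l.flatten := by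
  match l with
  | [] => simp [PySem.Chars.join_nil]
  | [p] => simp [PySem.Chars.join_singleton]
  | p :: q :: rest =>
    rw [PySem.Chars.join_cons_cons, pv_join_empty (q :: rest)]
    simp

-- A's pair fold with skip = false entering every step is the plain conditional fold
lemma pv_pairfold (n : List String) (l : List Int) (acc : String) :
    ((l.foldl
      (fun (st : String × Bool) i =>
        let skip := if PySem.Int.mod i 3 = 2 then true else st.2
        if skip then (st.1, false)
        else (st.1 ++ PySem.List.pyGetD n i "" ++ "\n", skip))
      (acc, false)).1)
    = l.foldl (fun a i => if PySem.Int.mod i 3 = 2 then a else a ++ PySem.List.pyGetD n i "" ++ "\n") acc := by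
  induction l generalizing acc with
  | nil => simp
  | cons i t ih =>
    simp only [List.foldl_cons]
    by_cases h : PySem.Int.mod i 3 = 2
    · simp only [h, ite_true]
      exact ih acc
    · simp only [h, ite_false]
      exact ih (acc ++ PySem.List.pyGetD n i "" ++ "\n")

-- the conditional fold over enumerate, started at a multiple of 3, appends pvSpecChars
lemma pv_enumfold (n : List String) (s : Int) (hs : PySem.Int.mod s 3 = 0) (acc : String) :
    ((PySem.List.enumerate n s).foldl
      (fun (a : String) (p : Int × String) => if PySem.Int.mod p.1 3 = 2 then a else a ++ p.2 ++ "\n") acc).toList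
    = acc.toList ++ pvSpecChars n := by
  have h3 : (0 : Int) < 3 := by decide
  rw [PySem.Int.mod_eq_emod_of_pos h3] at hs
  match n with
  | [] => simp [PySem.List.enumerate_nil, pvSpecChars, pvKeep]
  | [a] =>
    have h0 : ¬ (s % 3 = 2) := by omega
    simp [PySem.List.enumerate_cons, PySem.List.enumerate_nil, h0, pvSpecChars, pvKeep]
  | [a, b] =>
    have h0 : ¬ (s % 3 = 2) := by omega
    have h1 : ¬ ((s + 1) % 3 = 2) := by omega
    simp [PySem.List.enumerate_cons, PySem.List.enumerate_nil, h0, h1, pvSpecChars, pvKeep]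
  | a :: b :: c :: r =>
    have h0 : PySem.Int.mod s 3 ≠ 2 := by rw [PySem.Int.mod_eq_emod_of_pos h3]; omega
    have h1 : PySem.Int.mod (s + 1) 3 ≠ 2 := by rw [PySem.Int.mod_eq_emod_of_pos h3]; omega
    have h2 : PySem.Int.mod (s + 1 + 1) 3 = 2 := by rw [PySem.Int.mod_eq_emod_of_pos h3]; omega
    have hs3 : PySem.Int.mod (s + 1 + 1 + 1) 3 = 0 := by rw [PySem.Int.mod_eq_emod_of_pos h3]; omega
    have ih := pv_enumfold r (s + 1 + 1 + 1) hs3 (acc ++ a ++ "\n" ++ b ++ "\n")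
    simp only [PySem.List.enumerate_cons, List.foldl_cons, if_neg h0, if_neg h1, if_pos h2] at ih ⊢
    rw [ih]
    simp [pvSpecChars, pvKeep]

-- A computes pvSpecChars
lemma pv_A_chars (n : List String) : (skip_every_third_item n).toList = pvSpecChars n := by
  unfold skip_every_third_item
  rw [pv_pairfold]
  have he := PySem.List.enumerate_eq_map_pyRange n ""
  have hfold : (PySem.List.pyRange 0 (n.length : Int) 1).foldl
      (fun a i => if PySem.Int.mod i 3 = 2 then a else a ++ PySem.List.pyGetD n i "" ++ "\n") ""
      = (PySem.List.enumerate n 0).foldl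
      (fun (a : String) (p : Int × String) => if PySem.Int.mod p.1 3 = 2 then a else a ++ p.2 ++ "\n") "" := by
    rw [he, List.foldl_map]
    rfl
  rw [hfold, pv_enumfold n 0 (by decide) ""]
  simp

-- B's chunk flatMap is the kept elements, mapped
lemma pv_B_chunks (n : List String) :
    (List.range ((((n.length : Int) + 2) / 3).toNat)).flatMap
      (fun k => ((n.drop (3 * k)).take 2).map (fun s => s ++ "\n"))
    = (pvKeep n).map (fun s => s ++ "\n") := by
  match n with
  | [] =>
    have h0 : (((([] : List String).length : Int) + 2) / 3).toNat = 0 := by norm_num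
    rw [h0]; simp [pvKeep]
  | [a] =>
    have h0 : ((((a :: [] : List String).length : Int) + 2) / 3).toNat = 1 := by norm_num
    rw [h0]; simp [pvKeep, List.range_succ]
  | [a, b] =>
    have h0 : ((((a :: b :: [] : List String).length : Int) + 2) / 3).toNat = 1 := by norm_num
    rw [h0]; simp [pvKeep, List.range_succ]
  | a :: b :: c :: r =>
    have hcnt : ((((a :: b :: c :: r).length : Int) + 2) / 3).toNat
        = (((r.length : Int) + 2) / 3).toNat + 1 := by
      simp only [List.length_cons]
      push_cast
      omega
    rw [hcnt, List.range_succ_eq_map, List.flatMap_cons, List.flatMap_map]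
    have hshift : ∀ k : Nat, (a :: b :: c :: r).drop (3 * (k + 1)) = r.drop (3 * k) := by
      intro k
      rw [show 3 * (k + 1) = 3 + 3 * k from by ring, ← List.drop_drop]
      rfl
    simp only [hshift]
    rw [pv_B_chunks r]
    simp [pvKeep]

-- B computes pvSpecChars
lemma pv_B_chars (n : List String) : (skip_every_third_item_alt n).toList = pvSpecChars n := by
  unfold skip_every_third_item_alt
  rw [PySem.List.foldl_append_eq_flatMap, List.nil_append]
  rw [PySem.List.pyRange_of_pos 0 (n.length : Int) (by decide : (0:Int) < 3)]
  rw [List.flatMap_map]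
  have hsl : ∀ k : Nat, PySem.List.slice n (some (0 + 3 * (k : Int))) (some (0 + 3 * (k : Int) + 2))
      = (n.drop (3 * k)).take 2 := by
    intro k
    have h1 : (0 + 3 * (k : Int)) = ((3 * k : Nat) : Int) := by push_cast; ring
    have h2 : (0 + 3 * (k : Int) + 2) = ((3 * k : Nat) : Int) + ((2 : Nat) : Int) := by push_cast; ring
    rw [h2, h1, PySem.List.slice_natCast_add]
  have hif : (if (0:Int) < (n.length : Int) then (((n.length : Int) - 0 + 3 - 1) / 3).toNat else 0)
      = (((n.length : Int) + 2) / 3).toNat := by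
    by_cases h : (0:Int) < (n.length : Int)
    · rw [if_pos h]; congr 1; ring_nf
    · rw [if_neg h]
      have h0 : (n.length : Int) = 0 := by omega
      rw [h0]
      decide
  simp only [hsl, hif]
  rw [pv_B_chunks n]
  rw [PySem.Str.toList_join]
  have hnil : ("" : String).toList = [] := rfl
  rw [hnil, pv_join_empty]
  simp [pvSpecChars, List.map_map, Function.comp_def]

-- ===== VERDICT (by name: the statement is the Claim_ definition above) =====
theorem skip_every_third_item_spec : Claim_equal_skip_every_third_item := by
  intro n _
  unfold Spec_skip_every_third_item
  apply String.ext
  rw [pv_A_chars, pv_B_chars]
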